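-- pv_equiv track=rewrite | github.com/wwPDB/py-wwpdb_apps_ann_tasks_v2 | wwpdb/apps/ann_tasks_v2/io/PisaReader.py | __reCalculateCompositionBasedCurOrder
-- ===== SOURCE A (Python) =====
-- def __reCalculateCompositionBasedCurOrder(chnList, myMap):
--     compList = []
--     for chain_id in chnList:
--         if chain_id[0] == "[":
--             continue
--         #
--         if myMap[chain_id] > 1:
--             compList.append(chain_id + "(" + str(myMap[chain_id]) + ")")
--         else:
--             compList.append(chain_id)
--         #
--     #
--     for chain_id in chnList:
--         if chain_id[0] != "[":
--             continue
--         #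
--         if myMap[chain_id] > 1:
--             compList.append(chain_id + "(" + str(myMap[chain_id]) + ")")
--         else:
--             compList.append(chain_id)
--         #
--     #
--     return ",".join(compList)
-- ===== SOURCE B (Python) =====
-- def __reCalculateCompositionBasedCurOrder(chnList, myMap):
--     # single stable sort puts non-bracketed chains first, then one uniform formatting pass
--     order = sorted(chnList, key=lambda c: c[0] == "[")
--     comp = [c + "(" + str(myMap[c]) + ")" if myMap[c] > 1 else c for c in order]
--     return ",".join(comp)
-- ===== Notes on version B (the rewrite author's own statement) =====
-- stated objective: simpler
-- what changed: Replaces A's two filtered passes over chnList (non-bracketed then bracketed, each with inline formatting) by one stable sort on the bracket flag followed by a single uniform formatting pass.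
import Mathlib
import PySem

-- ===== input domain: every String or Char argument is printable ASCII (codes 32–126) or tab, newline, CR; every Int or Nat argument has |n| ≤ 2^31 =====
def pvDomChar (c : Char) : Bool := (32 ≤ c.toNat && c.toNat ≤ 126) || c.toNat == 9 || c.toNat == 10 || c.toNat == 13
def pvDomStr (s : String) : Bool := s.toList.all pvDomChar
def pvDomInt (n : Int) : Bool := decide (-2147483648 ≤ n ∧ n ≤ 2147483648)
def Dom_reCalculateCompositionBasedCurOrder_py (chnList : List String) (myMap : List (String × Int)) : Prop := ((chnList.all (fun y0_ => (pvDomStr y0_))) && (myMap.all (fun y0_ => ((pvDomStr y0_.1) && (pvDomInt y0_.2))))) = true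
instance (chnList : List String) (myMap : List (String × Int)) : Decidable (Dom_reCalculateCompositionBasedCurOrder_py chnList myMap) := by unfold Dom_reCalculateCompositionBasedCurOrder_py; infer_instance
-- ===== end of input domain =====

-- B replaces A's two filtered passes by one stable sort on the bracket flag plus a single
-- uniform formatting pass (objective: simpler).

-- ===== PORT A =====
-- two loops over chnList: first the chains whose first char is not '[', then the bracketed ones
def reCalculateCompositionBasedCurOrder_py (chnList : List String) (myMap : List (String × Int)) : String :=
  let d := PySem.Dict.mk myMap
  let compList : List String := chnList.foldl (fun acc chain_id =>
    if PySem.Str.pyGet? chain_id 0 == some '[' then acc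
    else if d.getD chain_id 0 > 1 then
      acc ++ [PySem.Str.join "" [chain_id, "(", PySem.Int.toStr (d.getD chain_id 0), ")"]]
    else acc ++ [chain_id]) []
  let compList2 : List String := chnList.foldl (fun acc chain_id =>
    if !(PySem.Str.pyGet? chain_id 0 == some '[') then acc
    else if d.getD chain_id 0 > 1 then
      acc ++ [PySem.Str.join "" [chain_id, "(", PySem.Int.toStr (d.getD chain_id 0), ")"]]
    else acc ++ [chain_id]) compList
  PySem.Str.join "," compList2

-- ===== PORT B =====
-- sort key: chain_id[0] == "["
def pvKey (c : String) : Bool := PySem.Str.pyGet? c 0 == some '['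

-- chain_id + "(" + str(myMap[chain_id]) + ")" if myMap[chain_id] > 1 else chain_id
def pvFmt (d : PySem.Dict String Int) (c : String) : String :=
  if d.getD c 0 > 1 then PySem.Str.join "" [c, "(", PySem.Int.toStr (d.getD c 0), ")"] else c

def reCalculateCompositionBasedCurOrder_py_alt (chnList : List String) (myMap : List (String × Int)) : String :=
  let d := PySem.Dict.mk myMap
  let order := PySem.List.sorted chnList pvKey false
  PySem.Str.join "," (order.map (pvFmt d))

-- ===== PRECONDITION & SPEC =====
-- Pre_ excludes exactly the inputs where Python A raises: an empty chain id (IndexError on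
-- chain_id[0]) or a chain id missing from myMap (KeyError).
def Pre_reCalculateCompositionBasedCurOrder_py (chnList : List String) (myMap : List (String × Int)) : Prop :=
  ∀ c ∈ chnList, c ≠ "" ∧ c ∈ myMap.map Prod.fst
instance (chnList : List String) (myMap : List (String × Int)) : Decidable (Pre_reCalculateCompositionBasedCurOrder_py chnList myMap) := by unfold Pre_reCalculateCompositionBasedCurOrder_py; infer_instance
def pvWitness_reCalculateCompositionBasedCurOrder_py : List String × (List (String × Int)) :=
  (["A", "[B]", "C"], [("A", 2), ("[B]", 3), ("C", 1)])

def Spec_reCalculateCompositionBasedCurOrder_py (chnList : List String) (myMap : List (String × Int)) (out : String) : Prop := out = reCalculateCompositionBasedCurOrder_py_alt chnList myMap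
instance (chnList : List String) (myMap : List (String × Int)) (out : String) : Decidable (Spec_reCalculateCompositionBasedCurOrder_py chnList myMap out) := by unfold Spec_reCalculateCompositionBasedCurOrder_py; infer_instance

-- ===== CLAIM (what is proved, stated in full; the proofs are below) =====
def Claim_equal_reCalculateCompositionBasedCurOrder_py : Prop := ∀ (chnList : List String) (myMap : List (String × Int)), Dom_reCalculateCompositionBasedCurOrder_py chnList myMap → Pre_reCalculateCompositionBasedCurOrder_py chnList myMap → Spec_reCalculateCompositionBasedCurOrder_py chnList myMap (reCalculateCompositionBasedCurOrder_py chnList myMap)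

-- ===== LEMMAS AND PROOFS =====

-- inserting a non-bracketed chain into (non-bracketed ++ bracketed) lands right before the bracketed block
lemma pv_insertBy_false (x : String) (F T : List String)
    (hF : ∀ f ∈ F, pvKey f = false) (hT : ∀ t ∈ T, pvKey t = true) (hx : pvKey x = false) :
    PySem.List.insertBy (fun a b => decide (pvKey a < pvKey b)) x (F ++ T) = F ++ x :: T := by
  induction F with
  | nil =>
    cases T with
    | nil => simp [PySem.List.insertBy]
    | cons t ts =>
      have ht : pvKey t = true := hT t (by simp)
      simp [PySem.List.insertBy, hx, ht]
  | cons f fs ih =>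
    have hf : pvKey f = false := hF f (by simp)
    simp only [List.cons_append, PySem.List.insertBy, hx, hf]
    simp [ih (fun g hg => hF g (by simp [hg]))]

-- the insertion-sort fold keeps the accumulator partitioned: non-bracketed block ++ bracketed block
lemma pv_foldl_insert_partition (xs : List String) (F T : List String)
    (hF : ∀ f ∈ F, pvKey f = false) (hT : ∀ t ∈ T, pvKey t = true) :
    xs.foldl (fun acc x => PySem.List.insertBy (fun a b => decide (pvKey a < pvKey b)) x acc) (F ++ T)
      = (F ++ xs.filter (fun c => !pvKey c)) ++ (T ++ xs.filter pvKey) := by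
  induction xs generalizing F T with
  | nil => simp
  | cons x xs ih =>
    simp only [List.foldl_cons, List.filter_cons]
    cases hx : pvKey x with
    | false =>
      rw [pv_insertBy_false x F T hF hT hx]
      have hF' : ∀ f ∈ F ++ [x], pvKey f = false := by
        intro f hf
        rcases List.mem_append.mp hf with h | h
        · exact hF f h
        · simp only [List.mem_singleton] at h
          subst h
          exact hx
      have hsplit : F ++ x :: T = (F ++ [x]) ++ T := by simp
      rw [hsplit, ih (F ++ [x]) T hF' hT]
      simp [List.append_assoc]
    | true =>
      have hnb : ∀ y ∈ F ++ T, (fun a b => decide (pvKey a < pvKey b)) x y = false := by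
        intro y _
        show decide (pvKey x < pvKey y) = false
        rw [hx]
        cases pvKey y <;> decide
      rw [PySem.List.insertBy_of_forall_not_before _ _ _ hnb]
      have hT' : ∀ t ∈ T ++ [x], pvKey t = true := by
        intro t ht
        rcases List.mem_append.mp ht with h | h
        · exact hT t h
        · simp only [List.mem_singleton] at h
          subst h
          exact hx
      have hsplit : (F ++ T) ++ [x] = F ++ (T ++ [x]) := by simp
      rw [hsplit, ih F (T ++ [x]) hF hT']
      simp [List.append_assoc]

-- the stable sort on the bracket flag IS the partition: non-bracketed chains first, each block in order
lemma pv_sorted_partition (xs : List String) :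
    PySem.List.sorted xs pvKey false = xs.filter (fun c => !pvKey c) ++ xs.filter pvKey := by
  rw [PySem.List.sorted_eq_foldl_insertBy]
  simpa using pv_foldl_insert_partition xs [] [] (by simp) (by simp)

-- A's first loop appends the formatted non-bracketed chains
lemma pv_loop1 (d : PySem.Dict String Int) (xs : List String) (acc : List String) :
    xs.foldl (fun acc c =>
      if PySem.Str.pyGet? c 0 == some '[' then acc
      else if d.getD c 0 > 1 then
        acc ++ [PySem.Str.join "" [c, "(", PySem.Int.toStr (d.getD c 0), ")"]]
      else acc ++ [c]) acc
    = acc ++ (xs.filter (fun c => !pvKey c)).map (pvFmt d) := by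
  refine Eq.trans (PySem.List.foldl_congr_mem xs _ _ acc ?_)
    (PySem.List.foldl_append_if (fun c => !pvKey c) (pvFmt d) xs acc)
  intro a c _
  by_cases h : PySem.List.pyGet? c.toList 0 = some '['
  · simp [pvKey, PySem.Str.pyGet?, h]
  · by_cases hv : d.getD c 0 > 1 <;> simp [pvKey, pvFmt, PySem.Str.pyGet?, h, hv]

-- A's second loop appends the formatted bracketed chains
lemma pv_loop2 (d : PySem.Dict String Int) (xs : List String) (acc : List String) :
    xs.foldl (fun acc c =>
      if !(PySem.Str.pyGet? c 0 == some '[') then acc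
      else if d.getD c 0 > 1 then
        acc ++ [PySem.Str.join "" [c, "(", PySem.Int.toStr (d.getD c 0), ")"]]
      else acc ++ [c]) acc
    = acc ++ (xs.filter pvKey).map (pvFmt d) := by
  refine Eq.trans (PySem.List.foldl_congr_mem xs _ _ acc ?_)
    (PySem.List.foldl_append_if pvKey (pvFmt d) xs acc)
  intro a c _
  by_cases h : PySem.List.pyGet? c.toList 0 = some '['
  · by_cases hv : d.getD c 0 > 1 <;> simp [pvKey, pvFmt, PySem.Str.pyGet?, h, hv]
  · simp [pvKey, PySem.Str.pyGet?, h]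

-- ===== VERDICT (by name: the statement is the Claim_ definition above) =====
theorem reCalculateCompositionBasedCurOrder_py_spec : Claim_equal_reCalculateCompositionBasedCurOrder_py := by
  intro chnList myMap _ _
  unfold Spec_reCalculateCompositionBasedCurOrder_py
  unfold reCalculateCompositionBasedCurOrder_py reCalculateCompositionBasedCurOrder_py_alt
  simp only [pv_loop1, pv_loop2, pv_sorted_partition, List.nil_append, List.map_append]
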